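-- pv_equiv track=rewrite | github.com/9ooDa/algo_prac | greedy/ecote_num_card_game.py | solution
-- ===== SOURCE A (Python) =====
-- def solution(n, m, arr):
--     row2num = {}
--     row = 1
--     for i in range(0, len(arr), m):
--         row2num[row] = arr[i:i+m]
--         row += 1
--
--     res = -1
--     for _, v in row2num.items():
--         res = max(min(v), res)
--
--     return res
-- ===== SOURCE B (Python) =====
-- def solution(n, m, arr):
--     # single streaming pass: maintain the current row's minimum and a global result
--     res = -1
--     cur_min = None
--     cnt = 0
--     for x in arr:
--         cur_min = x if cur_min is None else min(cur_min, x)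
--         cnt += 1
--         if cnt == m:
--             res = max(res, cur_min)
--             cur_min = None
--             cnt = 0
--     if cur_min is not None:  # partial last row
--         res = max(res, cur_min)
--     return res
-- ===== Notes on version B (the rewrite author's own statement) =====
-- stated objective: simpler
-- what changed: Replaces A's build-a-dict-of-sliced-rows-then-scan structure with one streaming pass over the flat list that keeps a running row minimum and a counter, flushing into the global maximum each time a row completes; no dict, no slicing, O(1) extra space.
-- outside the precondition, e.g. on solution(1, -2, [1, 2]): A returns -1, B returns 1
import Mathlib
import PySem

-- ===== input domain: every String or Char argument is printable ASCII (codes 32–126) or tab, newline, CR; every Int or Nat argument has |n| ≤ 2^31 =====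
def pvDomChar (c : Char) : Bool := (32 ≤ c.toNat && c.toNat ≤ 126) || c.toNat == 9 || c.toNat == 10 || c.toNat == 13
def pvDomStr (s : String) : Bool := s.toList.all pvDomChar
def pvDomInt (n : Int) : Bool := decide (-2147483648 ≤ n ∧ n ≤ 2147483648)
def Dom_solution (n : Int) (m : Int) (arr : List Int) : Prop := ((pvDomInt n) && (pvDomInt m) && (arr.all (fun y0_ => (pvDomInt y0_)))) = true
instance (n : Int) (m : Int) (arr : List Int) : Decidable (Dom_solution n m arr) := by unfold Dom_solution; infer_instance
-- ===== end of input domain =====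

-- B replaces A's build-a-dict-of-sliced-rows-then-scan with one streaming pass (running row
-- minimum + counter, flushed into the global max at each full row): simpler, O(1) extra space.

-- ===== PORT A =====
-- body of A's first loop: row2num[row] = arr[i:i+m]; row += 1
def arow (m : Int) (arr : List Int) (st : PySem.Dict Int (List Int) × Int) (i : Int) :
    PySem.Dict Int (List Int) × Int :=
  (st.1.insert st.2 (PySem.List.slice arr (some i) (some (i + m))), st.2 + 1)

-- body of A's second loop: res = max(min(v), res); min([]) raises ValueError in Python —
-- the `none` branch is unreachable under Pre_solution (every stored row is nonempty for m ≥ 1)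
def ares (res : Int) (kv : Int × List Int) : Int :=
  match PySem.List.min? kv.2 (fun y => y) with
  | some mn => max mn res
  | none => res

def solution (n : Int) (m : Int) (arr : List Int) : Int :=
  let st := (PySem.List.pyRange 0 (arr.length : Int) m).foldl (arow m arr) (PySem.Dict.empty, 1)
  st.1.items.foldl ares (-1)

-- ===== PORT B =====
-- body of B's loop: update cur_min and cnt; on a full row flush into res and reset
def bstep (m : Int) (st : Int × Option Int × Int) (x : Int) : Int × Option Int × Int :=
  let c := match st.2.1 with
    | none => x
    | some c0 => min c0 x
  let cnt := st.2.2 + 1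
  if cnt = m then (max st.1 c, none, 0) else (st.1, some c, cnt)

def solution_alt (n : Int) (m : Int) (arr : List Int) : Int :=
  let st := arr.foldl (bstep m) (-1, none, 0)
  match st.2.1 with       -- if cur_min is not None: res = max(res, cur_min)
  | some c => max st.1 c
  | none => st.1

-- ===== PRECONDITION & SPEC =====
-- Pre_ excludes m = 0, where A raises ValueError at range(0, len(arr), 0), and m < 0, which is
-- outside the natural domain of a row width (range() yields no indices there, so no row exists).
def Pre_solution (n : Int) (m : Int) (arr : List Int) : Prop := 1 ≤ m
instance (n : Int) (m : Int) (arr : List Int) : Decidable (Pre_solution n m arr) := by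
  unfold Pre_solution; infer_instance

def pvWitness_solution : Int × Int × List Int := (2, 3, [1, 2, 3, 4, 5, 6])

def Spec_solution (n : Int) (m : Int) (arr : List Int) (out : Int) : Prop := out = solution_alt n m arr
instance (n : Int) (m : Int) (arr : List Int) (out : Int) : Decidable (Spec_solution n m arr out) := by
  unfold Spec_solution; infer_instance

-- ===== CLAIM (what is proved, stated in full; the proofs are below) =====
def Claim_equal_solution : Prop := ∀ (n : Int) (m : Int) (arr : List Int), Dom_solution n m arr → Pre_solution n m arr → Spec_solution n m arr (solution n m arr)

-- ===== LEMMAS AND PROOFS =====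

-- the common specification both ports are reduced to: arr cut in rows of size k+1, then
-- a fold of max-of-row-minima
def chmin : List Int → Int
  | [] => 0
  | x :: t => t.foldl min x

def chunksP (k : Nat) (l : List Int) : List (List Int) :=
  match l with
  | [] => []
  | x :: xs => (x :: xs.take k) :: chunksP k (xs.drop k)
termination_by l.length
decreasing_by simp only [List.length_drop, List.length_cons]; omega

def gfold (res : Int) (cs : List (List Int)) : Int := cs.foldl (fun r ch => max r (chmin ch)) res

def brun (m res : Int) (arr : List Int) : Int :=
  (fun st : Int × Option Int × Int =>
    match st.2.1 with
    | some c => max st.1 c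
    | none => st.1) (arr.foldl (bstep m) (res, none, 0))

lemma chunksP_nil (k : Nat) : chunksP k [] = [] := by rw [chunksP.eq_def]

lemma chunksP_cons (k : Nat) (x : Int) (xs : List Int) :
    chunksP k (x :: xs) = (x :: xs.take k) :: chunksP k (xs.drop k) := by
  rw [chunksP.eq_def]

lemma chunksP_ne_nil (k : Nat) : ∀ (N : Nat) (l : List Int), l.length ≤ N →
    ∀ ch ∈ chunksP k l, ch ≠ [] := by
  intro N
  induction N with
  | zero => intro l hl ch hch; simp [List.length_eq_zero_iff.mp (Nat.le_zero.mp hl), chunksP_nil] at hch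
  | succ N ih =>
    intro l hl ch hch
    cases l with
    | nil => simp [chunksP_nil] at hch
    | cons x xs =>
      rw [chunksP_cons, List.mem_cons] at hch
      rcases hch with h | h
      · simp [h]
      · exact ih (xs.drop k) (by simp at hl ⊢; omega) ch h

lemma pyRange_pos_cons (a b s : Int) (hs : 0 < s) (hab : a < b) :
    PySem.List.pyRange a b s = a :: PySem.List.pyRange (a + s) b s := by
  rw [PySem.List.pyRange_of_pos _ _ hs, PySem.List.pyRange_of_pos _ _ hs]
  have h1 : (if a < b then ((b - a + s - 1) / s).toNat else 0)
      = (if a + s < b then ((b - (a + s) + s - 1) / s).toNat else 0) + 1 := by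
    rw [if_pos hab]
    by_cases h2 : a + s < b
    · rw [if_pos h2]
      have e1 : b - a + s - 1 = (b - (a + s) + s - 1) + 1 * s := by ring
      rw [e1, Int.add_mul_ediv_right _ _ (by omega)]
      have : 0 ≤ (b - (a + s) + s - 1) / s := Int.ediv_nonneg (by omega) (by omega)
      omega
    · rw [if_neg h2]
      have e1 : (b - a + s - 1) / s = 1 := by
        rw [← PySem.Int.floordiv_eq_ediv_of_pos hs, PySem.Int.floordiv_eq_iff_of_pos hs]
        omega
      rw [e1]; omega
  rw [h1, List.range_succ_eq_map]
  simp only [List.map_cons, List.map_map]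
  congr 1
  · simp
  · apply List.map_congr_left
    intro k _
    simp only [Function.comp_apply]
    push_cast
    ring

lemma pyRange_pos_shift (b s : Int) (hs : 0 < s) :
    PySem.List.pyRange s b s = (PySem.List.pyRange 0 (b - s) s).map (· + s) := by
  rw [PySem.List.pyRange_of_pos _ _ hs, PySem.List.pyRange_of_pos _ _ hs]
  have hc : (if s < b then ((b - s + s - 1) / s).toNat else 0)
      = (if (0 : Int) < b - s then ((b - s - 0 + s - 1) / s).toNat else 0) := by
    by_cases h : s < b
    · rw [if_pos h, if_pos (by omega)]; congr 2; ring
    · rw [if_neg h, if_neg (by omega)]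
  rw [hc, List.map_map]
  apply List.map_congr_left
  intro k _
  simp only [Function.comp_apply]
  ring

-- the slices A stores are exactly the rows of chunksP
lemma slices_eq_chunks (m : Int) (hm : 1 ≤ m) : ∀ (N : Nat) (arr : List Int), arr.length ≤ N →
    (PySem.List.pyRange 0 (arr.length : Int) m).map
        (fun i => PySem.List.slice arr (some i) (some (i + m)))
      = chunksP (m.toNat - 1) arr := by
  intro N
  induction N with
  | zero =>
    intro arr hl
    have : arr = [] := List.length_eq_zero_iff.mp (Nat.le_zero.mp hl)
    subst this
    simp [chunksP_nil, PySem.List.pyRange_of_pos 0 0 (show (0:Int) < m by omega)]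
  | succ N ih =>
    intro arr hl
    cases arr with
    | nil => simp [chunksP_nil, PySem.List.pyRange_of_pos 0 0 (show (0:Int) < m by omega)]
    | cons x xs =>
      have hL : ((x :: xs).length : Int) = (xs.length : Int) + 1 := by simp
      rw [pyRange_pos_cons 0 _ m (by omega) (by exact_mod_cast Nat.succ_pos xs.length)]
      rw [chunksP_cons, List.map_cons]
      obtain ⟨j, hj⟩ : ∃ j, m.toNat = j + 1 := ⟨m.toNat - 1, by omega⟩
      have hhead : PySem.List.slice (x :: xs) (some 0) (some (0 + m)) = x :: xs.take (m.toNat - 1) := by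
        rw [zero_add, PySem.List.slice_zero_start, PySem.List.slice_to _ (by omega), hj,
          List.take_succ_cons]
        simp
      rw [hhead, zero_add]
      congr 1
      by_cases hbig : ((x :: xs).length : Int) ≤ m
      · -- only one (possibly partial) row
        have h1 : PySem.List.pyRange m ((x :: xs).length : Int) m = [] := by
          rw [PySem.List.pyRange_of_pos _ _ (show (0:Int) < m by omega), if_neg (by omega)]
          simp
        have h2 : xs.drop (m.toNat - 1) = [] := by
          apply List.drop_eq_nil_of_le; simp only [List.length_cons] at hbig ⊢
          push_cast at hbig; omega
        rw [h1, h2, chunksP_nil]; simp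
      · -- shift the remaining indices down by m and recurse on the dropped list
        rw [pyRange_pos_shift _ m (by omega), List.map_map]
        have hdrop : (x :: xs).drop m.toNat = xs.drop (m.toNat - 1) := by
          rw [hj, List.drop_succ_cons]
          simp
        have hlen : ((x :: xs).length : Int) - m = (((x :: xs).drop m.toNat).length : Int) := by
          simp; omega
        have hstep : ((PySem.List.pyRange 0 (((x :: xs).length : Int) - m) m).map
              ((fun i => PySem.List.slice (x :: xs) (some i) (some (i + m))) ∘ (· + m)))
            = (PySem.List.pyRange 0 ((((x :: xs).drop m.toNat).length : Int)) m).map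
              (fun i => PySem.List.slice ((x :: xs).drop m.toNat) (some i) (some (i + m))) := by
          rw [← hlen]
          apply List.map_congr_left
          intro i hi
          have hi0 : 0 ≤ i := ((PySem.List.mem_pyRange_iff_of_pos (by omega) i).mp hi).1
          simp only [Function.comp]
          rw [PySem.List.slice_toNat _ (by omega) (by omega),
              PySem.List.slice_toNat _ (by omega) (by omega), List.drop_drop]
          congr 1
          · omega
          · congr 1
            omega
        rw [hstep, ih _ (by simp at hl ⊢; omega), hdrop]

-- the values of A's dict, in insertion order, are the stored slices
lemma dict_items_snd (m : Int) (arr : List Int) : ∀ (idxs : List Int)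
    (d : PySem.Dict Int (List Int)) (row : Int), (∀ key ∈ d.keys, key < row) →
    ((idxs.foldl (arow m arr) (d, row)).1).items.map Prod.snd
      = d.items.map Prod.snd ++ idxs.map (fun i => PySem.List.slice arr (some i) (some (i + m))) := by
  intro idxs
  induction idxs with
  | nil => intro d row _; simp
  | cons i is ih =>
    intro d row hinv
    have hnc : d.contains row = false := by
      by_contra h
      have := hinv row ((PySem.Dict.contains_iff_mem_keys d row).mp (by simpa using h))
      omega
    have hstep : (i :: is).foldl (arow m arr) (d, row)
        = is.foldl (arow m arr)
            (d.insert row (PySem.List.slice arr (some i) (some (i + m))), row + 1) := by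
      simp [arow]
    rw [hstep, ih _ (row + 1) (by
      intro key hk
      rcases (PySem.Dict.mem_keys_insert _ _ _ _).mp hk with h | h
      · omega
      · have := hinv key h; omega)]
    rw [PySem.Dict.items_insert_of_not_contains _ _ hnc]
    simp

-- A's result fold over nonempty rows is gfold
lemma ares_fold_eq_gfold : ∀ (cs : List (List Int)), (∀ ch ∈ cs, ch ≠ []) → ∀ res : Int,
    cs.foldl (fun r v => ares r (0, v)) res = gfold res cs := by
  intro cs
  induction cs with
  | nil => intro _ res; simp [gfold]
  | cons ch cs ih =>
    intro h res
    cases ch with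
    | nil => exact absurd rfl (h [] (by simp))
    | cons y t =>
      have hstep : ares res (0, y :: t) = max res (chmin (y :: t)) := by
        simp [ares, PySem.List.min?_id_cons, chmin, max_comm]
      simp only [gfold, List.foldl_cons]
      rw [hstep]
      have := ih (fun c hc => h c (by simp [hc])) (max res (chmin (y :: t)))
      simp only [gfold] at this
      exact this

lemma A_eq_gfold (n m : Int) (arr : List Int) (hm : 1 ≤ m) :
    solution n m arr = gfold (-1) (chunksP (m.toNat - 1) arr) := by
  have hitems : (((PySem.List.pyRange 0 (arr.length : Int) m).foldl (arow m arr)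
        (PySem.Dict.empty, 1)).1).items.map Prod.snd
      = (PySem.List.pyRange 0 (arr.length : Int) m).map
          (fun i => PySem.List.slice arr (some i) (some (i + m))) := by
    rw [dict_items_snd m arr _ PySem.Dict.empty 1 (by
      intro key hk
      simp [PySem.Dict.keys_empty] at hk)]
    rfl
  have hfold : solution n m arr
      = ((((PySem.List.pyRange 0 (arr.length : Int) m).foldl (arow m arr)
          (PySem.Dict.empty, 1)).1).items.map Prod.snd).foldl (fun r v => ares r (0, v)) (-1) := by
    unfold solution
    rw [List.foldl_map]
    rfl
  rw [hfold, hitems, slices_eq_chunks m hm arr.length arr (le_refl _)]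
  exact ares_fold_eq_gfold _ (chunksP_ne_nil _ arr.length arr (le_refl _)) (-1)

-- B inside a row that does not complete
lemma Bpart (m : Int) : ∀ (l : List Int) (res c cnt : Int), 0 ≤ cnt → cnt + (l.length : Int) < m →
    l.foldl (bstep m) (res, some c, cnt) = (res, some (l.foldl min c), cnt + (l.length : Int)) := by
  intro l
  induction l with
  | nil => intro res c cnt _ _; simp
  | cons y t ih =>
    intro res c cnt h0 hlt
    simp only [List.foldl_cons, bstep]
    rw [if_neg (by simp at hlt; omega)]
    rw [ih res (min c y) (cnt + 1) (by omega) (by simp at hlt ⊢; omega)]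
    simp; omega

-- B across a row that completes exactly at its last element
lemma Brun (m : Int) : ∀ (l : List Int) (res c cnt : Int), 0 ≤ cnt →
    cnt + (l.length : Int) = m → l ≠ [] →
    l.foldl (bstep m) (res, some c, cnt) = (max res (l.foldl min c), none, 0) := by
  intro l
  induction l with
  | nil => intro _ _ _ _ _ h; exact absurd rfl h
  | cons y t ih =>
    intro res c cnt h0 heq _
    cases t with
    | nil =>
      simp only [List.foldl_cons, bstep]
      rw [if_pos (by simp at heq; omega)]
      simp
    | cons z t' =>
      have hne : ¬ (cnt + 1 = m) := by
        simp only [List.length_cons] at heq; push_cast at heq; omega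
      have hstep : bstep m (res, some c, cnt) y = (res, some (min c y), cnt + 1) := by
        simp [bstep, hne]
      rw [List.foldl_cons, hstep]
      apply ih res (min c y) (cnt + 1) (by omega) _ (by simp)
      simp only [List.length_cons] at heq ⊢; push_cast at heq ⊢; omega

lemma B_eq_gfold (m : Int) (hm : 1 ≤ m) : ∀ (N : Nat) (arr : List Int), arr.length ≤ N →
    ∀ res : Int, brun m res arr = gfold res (chunksP (m.toNat - 1) arr) := by
  intro N
  induction N with
  | zero =>
    intro arr hl res
    have : arr = [] := List.length_eq_zero_iff.mp (Nat.le_zero.mp hl)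
    subst this; simp [brun, gfold, chunksP_nil]
  | succ N ih =>
    intro arr hl res
    cases arr with
    | nil => simp [brun, gfold, chunksP_nil]
    | cons x xs =>
      rw [chunksP_cons]
      by_cases h1 : m = 1
      · -- row of width 1 completes at once
        subst h1
        have hstep : bstep 1 (res, none, (0 : Int)) x = (max res x, none, 0) := by
          simp [bstep]
        have : brun 1 res (x :: xs) = brun 1 (max res x) xs := by
          simp only [brun, List.foldl_cons, hstep]
        rw [this, ih xs (by simp at hl; omega) (max res x)]
        simp [gfold, chmin]
      · have hstep : bstep m (res, none, (0 : Int)) x = (res, some x, 1) := by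
          simp [bstep]; omega
        by_cases h2 : (xs.length : Int) + 1 < m
        · -- the whole input is one partial row
          have hfold : (x :: xs).foldl (bstep m) (res, none, 0)
              = (res, some (xs.foldl min x), 1 + (xs.length : Int)) := by
            simp only [List.foldl_cons, hstep]
            exact Bpart m xs res x 1 (by omega) (by omega)
          have htake : xs.take (m.toNat - 1) = xs := List.take_of_length_le (by omega)
          have hdrop : xs.drop (m.toNat - 1) = [] := List.drop_eq_nil_of_le (by omega)
          rw [htake, hdrop, chunksP_nil]
          simp [brun, hfold, gfold, chmin]
        · -- a full row, then recurse on the rest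
          have hsplit : xs = xs.take (m.toNat - 1) ++ xs.drop (m.toNat - 1) :=
            (List.take_append_drop _ _).symm
          have hfull : (xs.take (m.toNat - 1)).foldl (bstep m) (res, some x, 1)
              = (max res ((xs.take (m.toNat - 1)).foldl min x), none, 0) := by
            apply Brun m _ res x 1 (by omega)
            · simp only [List.length_take]; push_cast; omega
            · intro hnil
              have hlen0 := congrArg List.length hnil
              simp only [List.length_take, List.length_nil] at hlen0
              omega
          have : brun m res (x :: xs)
              = brun m (max res ((xs.take (m.toNat - 1)).foldl min x)) (xs.drop (m.toNat - 1)) := by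
            simp only [brun, List.foldl_cons, hstep]
            conv_lhs => rw [hsplit]
            rw [List.foldl_append, hfull]
          rw [this, ih (xs.drop (m.toNat - 1)) (by simp at hl ⊢; omega)]
          simp [gfold, chmin]

-- ===== VERDICT (by name: the statement is the Claim_ definition above) =====
theorem solution_spec : Claim_equal_solution := by
  intro n m arr _ hpre
  unfold Spec_solution
  have hm : 1 ≤ m := hpre
  rw [A_eq_gfold n m arr hm]
  have hB := B_eq_gfold m hm arr.length arr (le_refl _) (-1)
  have : solution_alt n m arr = brun m (-1) arr := rfl
  rw [this, hB]
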